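-- pv_equiv track=rewrite | github.com/Vnntnn/Network-Lab-Campus | backend/seed.py | _ip_sort_key
-- ===== SOURCE A (Python) =====
-- def _ip_sort_key(value: str) -> tuple[int, int, int, int]:
--     octets = []
--     for part in value.split("."):
--         try:
--             octets.append(int(part))
--         except ValueError:
--             octets.append(-1)
--
--     while len(octets) < 4:
--         octets.append(-1)
--
--     return tuple(octets[:4])
-- ===== SOURCE B (Python) =====
-- def _ip_sort_key(value: str) -> tuple[int, int, int, int]:
--     def octet(text: str) -> int:
--         try:
--             return int(text)
--         except ValueError:
--             return -1
--
--     def go(s: str, k: int) -> tuple: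
--         pieces = s.split(".", 1)
--         if k == 1 or len(pieces) == 1:
--             return (octet(pieces[0]),) + (-1,) * (k - 1)
--         return (octet(pieces[0]),) + go(pieces[1], k - 1)
--
--     return go(value, 4)
-- ===== Notes on version B (the rewrite author's own statement) =====
-- stated objective: alternative
-- what changed: B is a recursive peel-one-octet parser: it splits off only the part before the first separator (maxsplit 1) and recurses on the remainder with a countdown of 4, stopping once four octets exist, instead of A's three stages (parse every split part, pad with a while loop, slice to 4); B never materializes the full parts list and never parses parts beyond the fourth.
import Mathlib
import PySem

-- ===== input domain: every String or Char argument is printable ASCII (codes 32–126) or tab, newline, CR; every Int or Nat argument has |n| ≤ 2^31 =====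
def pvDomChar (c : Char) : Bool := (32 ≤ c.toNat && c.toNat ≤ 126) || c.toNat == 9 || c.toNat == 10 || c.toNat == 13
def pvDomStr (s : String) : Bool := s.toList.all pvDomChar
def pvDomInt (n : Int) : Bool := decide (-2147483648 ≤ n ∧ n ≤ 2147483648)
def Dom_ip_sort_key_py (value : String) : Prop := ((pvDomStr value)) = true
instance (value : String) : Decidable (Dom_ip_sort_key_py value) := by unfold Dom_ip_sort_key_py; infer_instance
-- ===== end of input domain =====

-- B is a recursive split-once parser (peel one octet, recurse on the remainder with a
-- countdown of 4) instead of A's parse-all / pad-while / slice pipeline: objective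
-- 'alternative', same cost; B stops after the fourth octet.

-- ===== PORT A =====
-- the 'while len(octets) < 4: octets.append(-1)' loop
def ipPadA (l : List Int) : List Int :=
  if l.length < 4 then ipPadA (l ++ [-1]) else l
termination_by 4 - l.length

-- 'try: int(part) except ValueError: -1'
def ipOctA (part : String) : Int :=
  match PySem.Int.ofStr? part with
  | some n => n
  | none => -1

def ip_sort_key_py (value : String) : Int × Int × Int × Int :=
  -- value.split(".") : "." ≠ "" so split? is some; getD is never the default
  let octets := ((PySem.Str.split? value ".").getD []).foldl
    (fun acc part => acc ++ [ipOctA part]) []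
  let octets := ipPadA octets
  -- tuple(octets[:4]): octets has length ≥ 4 here, so the fallback is unreachable
  match PySem.List.slice octets none (some 4) with
  | [a, b, c, d] => (a, b, c, d)
  | _ => (0, 0, 0, 0)

-- ===== PORT B =====
-- 'try: int(text) except ValueError: -1' (none = the ValueError branch)
def ipOctB (text : String) : Int :=
  (PySem.Int.ofStr? text).getD (-1)

-- go(s, k): pieces = s.split(".", 1); if k == 1 or len(pieces) == 1:
--   (octet(pieces[0]),) + (-1,)*(k-1)  else  (octet(pieces[0]),) + go(pieces[1], k-1)
-- (the tuple is built as a list; "." ≠ "" so splitMax? is some and getD never defaults)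
def ipGoB (s : String) : Nat → List Int
  | 0 => []
  | Nat.succ k =>
    let pieces := (PySem.Str.splitMax? s "." 1).getD []
    if k = 0 ∨ pieces.length = 1 then
      ipOctB (pieces.getD 0 "") :: List.replicate k (-1)
    else
      ipOctB (pieces.getD 0 "") :: ipGoB (pieces.getD 1 "") k

-- go(value, 4) IS the returned 4-tuple; ipGoB models it as the list of its
-- entries (always exactly 4 of them), read back positionally here
def ip_sort_key_py_alt (value : String) : Int × Int × Int × Int :=
  let key := ipGoB value 4
  (key.getD 0 0, key.getD 1 0, key.getD 2 0, key.getD 3 0)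

-- ===== PRECONDITION & SPEC =====
def Spec_ip_sort_key_py (value : String) (out : Int × Int × Int × Int) : Prop := out = ip_sort_key_py_alt value
instance (value : String) (out : Int × Int × Int × Int) : Decidable (Spec_ip_sort_key_py value out) := by unfold Spec_ip_sort_key_py; infer_instance

-- ===== CLAIM (what is proved, stated in full; the proofs are below) =====
def Claim_equal_ip_sort_key_py : Prop := ∀ (value : String), Dom_ip_sort_key_py value → Spec_ip_sort_key_py value (ip_sort_key_py value)

-- ===== LEMMAS AND PROOFS =====

-- reference versions of split('.') and split('.', 1), structural on the char list
def ipConsHead (c : Char) : List (List Char) → List (List Char)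
  | [] => [[c]]
  | h :: t => (c :: h) :: t

def ipSplitDot : List Char → List (List Char)
  | [] => [[]]
  | c :: t => if c = '.' then [] :: ipSplitDot t else ipConsHead c (ipSplitDot t)

def ipSplitDot1 : List Char → List (List Char)
  | [] => [[]]
  | c :: t => if c = '.' then [[], t] else ipConsHead c (ipSplitDot1 t)

theorem ipSplitDot_ne_nil (l : List Char) : ipSplitDot l ≠ [] := by
  cases l with
  | nil => simp [ipSplitDot]
  | cons c t =>
      simp only [ipSplitDot]
      split
      · simp
      · cases h : ipSplitDot t <;> simp [ipConsHead]

theorem ipSplitDot1_ne_nil (l : List Char) : ipSplitDot1 l ≠ [] := by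
  cases l with
  | nil => simp [ipSplitDot1]
  | cons c t =>
      simp only [ipSplitDot1]
      split
      · simp
      · cases h : ipSplitDot1 t <;> simp [ipConsHead]

-- the accumulator form of Chars.splitOn.go, for sep = ['.']
theorem ip_splitOn_go (fuel : Nat) (l cur : List Char) (acc : List (List Char))
    (hf : l.length < fuel) :
    PySem.Chars.splitOn.go ['.'] fuel l cur acc =
      acc.reverse ++ ((cur.reverse ++ (ipSplitDot l).headD []) :: (ipSplitDot l).tail) := by
  induction fuel generalizing l cur acc with
  | zero => omega
  | succ fuel ih =>
      cases l with
      | nil =>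
          rw [PySem.Chars.splitOn.go.eq_def]
          simp [ipSplitDot]
      | cons c rest =>
          rw [PySem.Chars.splitOn.go.eq_def]
          simp only []
          by_cases hc : c = '.'
          · subst hc
            have hpre : List.isPrefixOf ['.'] ('.' :: rest) = true := by
              simp [List.isPrefixOf]
            simp only [hpre, if_true]
            rw [ih _ _ _ (by simpa using Nat.lt_of_succ_lt_succ hf)]
            have hne := ipSplitDot_ne_nil rest
            cases h : ipSplitDot rest with
            | nil => exact absurd h hne
            | cons h0 ht => simp [ipSplitDot, h]
          · have hpre : List.isPrefixOf ['.'] (c :: rest) = false := by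
              simp [List.isPrefixOf]; exact fun h => hc h.symm
            simp only [hpre]
            rw [if_neg (by simp)]
            rw [ih _ _ _ (by simpa using Nat.lt_of_succ_lt_succ hf)]
            have hne := ipSplitDot_ne_nil rest
            cases h : ipSplitDot rest with
            | nil => exact absurd h hne
            | cons h0 ht => simp [ipSplitDot, hc, h, ipConsHead]
  
-- the accumulator form of Chars.splitOnMax.go at maxsplit 0
theorem ip_splitOnMax_go_zero (fuel : Nat) (l cur : List Char) (acc : List (List Char)) :
    PySem.Chars.splitOnMax.go ['.'] fuel 0 l cur acc =
      acc.reverse ++ [cur.reverse ++ l] := by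
  rw [PySem.Chars.splitOnMax.go.eq_def]
  cases fuel with
  | zero => simp
  | succ fuel => cases l <;> simp

-- the accumulator form of Chars.splitOnMax.go at maxsplit 1, sep = ['.']
theorem ip_splitOnMax_go_one (fuel : Nat) (l cur : List Char) (acc : List (List Char))
    (hf : l.length < fuel) :
    PySem.Chars.splitOnMax.go ['.'] fuel 1 l cur acc =
      acc.reverse ++ ((cur.reverse ++ (ipSplitDot1 l).headD []) :: (ipSplitDot1 l).tail) := by
  induction fuel generalizing l cur acc with
  | zero => omega
  | succ fuel ih =>
      cases l with
      | nil =>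
          rw [PySem.Chars.splitOnMax.go.eq_def]
          simp [ipSplitDot1]
      | cons c rest =>
          rw [PySem.Chars.splitOnMax.go.eq_def]
          simp only []
          by_cases hc : c = '.'
          · subst hc
            have hpre : List.isPrefixOf ['.'] ('.' :: rest) = true := by
              simp [List.isPrefixOf]
            simp only [hpre, if_true, if_neg (by norm_num : ¬ (1 : Nat) = 0)]
            rw [show (1 : Nat) - 1 = 0 from rfl]
            rw [ip_splitOnMax_go_zero]
            simp [ipSplitDot1]
          · have hpre : List.isPrefixOf ['.'] (c :: rest) = false := by
              simp [List.isPrefixOf]; exact fun h => hc h.symm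
            simp only [hpre, if_neg (by norm_num : ¬ (1 : Nat) = 0)]
            rw [if_neg (by simp)]
            rw [ih _ _ _ (by simpa using Nat.lt_of_succ_lt_succ hf)]
            have hne := ipSplitDot1_ne_nil rest
            cases h : ipSplitDot1 rest with
            | nil => exact absurd h hne
            | cons h0 ht => simp [ipSplitDot1, hc, h, ipConsHead]

theorem ip_splitOn_eq (l : List Char) :
    PySem.Chars.splitOn l ['.'] = ipSplitDot l := by
  unfold PySem.Chars.splitOn
  rw [ip_splitOn_go _ _ _ _ (Nat.lt_succ_self _)]
  have hne := ipSplitDot_ne_nil l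
  cases h : ipSplitDot l with
  | nil => exact absurd h hne
  | cons h0 ht => simp

theorem ip_splitMax1_eq (l : List Char) :
    PySem.Chars.splitOnMax l ['.'] 1 = ipSplitDot1 l := by
  unfold PySem.Chars.splitOnMax
  rw [if_neg (by norm_num)]
  rw [show ((1 : Int).toNat) = 1 from rfl]
  rw [ip_splitOnMax_go_one _ _ _ _ (Nat.lt_succ_self _)]
  have hne := ipSplitDot1_ne_nil l
  cases h : ipSplitDot1 l with
  | nil => exact absurd h hne
  | cons h0 ht => simp

-- ipSplitDot1 has exactly one or two pieces, and ipSplitDot peels accordingly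
theorem ip_splitDot1_shape (l : List Char) :
    (∃ h, ipSplitDot1 l = [h] ∧ ipSplitDot l = [h]) ∨
    (∃ h r, ipSplitDot1 l = [h, r] ∧ ipSplitDot l = h :: ipSplitDot r) := by
  induction l with
  | nil => exact Or.inl ⟨[], rfl, rfl⟩
  | cons c t ih =>
      by_cases hc : c = '.'
      · subst hc
        exact Or.inr ⟨[], t, by simp [ipSplitDot1], by simp [ipSplitDot]⟩
      · rcases ih with ⟨h, h1, h2⟩ | ⟨h, r, h1, h2⟩
        · exact Or.inl ⟨c :: h, by simp [ipSplitDot1, hc, h1, ipConsHead],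
            by simp [ipSplitDot, hc, h2, ipConsHead]⟩
        · exact Or.inr ⟨c :: h, r, by simp [ipSplitDot1, hc, h1, ipConsHead],
            by simp [ipSplitDot, hc, h2, ipConsHead]⟩

-- B's recursion computes "take k of the parts, mapped through octet, padded with -1"
theorem ipGoB_eq (k : Nat) (hk : 0 < k) (s : String) :
    ipGoB s k =
      ((ipSplitDot s.toList).map (fun p => ipOctB (String.ofList p))).take k ++
        List.replicate (k - (ipSplitDot s.toList).length) (-1) := by
  induction k generalizing s with
  | zero => omega
  | succ k ih =>
      have hsplit : (PySem.Str.splitMax? s "." 1).getD [] =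
          (ipSplitDot1 s.toList).map String.ofList := by
        simp [PySem.Str.splitMax?, PySem.Chars.splitMax?, ip_splitMax1_eq]
      rcases ip_splitDot1_shape s.toList with ⟨h, h1, h2⟩ | ⟨h, r, h1, h2⟩
      · rw [ipGoB]
        rw [hsplit, h1, h2]
        simp
      · rw [ipGoB]
        rw [hsplit, h1, h2]
        cases k with
        | zero => simp
        | succ k =>
            have hlen : ¬ (k + 1 = 0 ∨ (([h, r].map String.ofList)).length = 1) := by
              simp
            rw [if_neg hlen]
            simp only [List.map_cons, List.map_nil, List.getD_cons_zero,
              List.getD_cons_succ]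
            rw [ih (Nat.succ_pos k) (String.ofList r), String.toList_ofList]
            have hrep : k + 1 - (ipSplitDot r).length
                = k + 1 + 1 - (h :: ipSplitDot r).length := by
              simp
            rw [List.take_succ_cons, List.cons_append, hrep]

-- A's parts list
theorem ip_splitA_eq (s : String) :
    (PySem.Str.split? s ".").getD [] = (ipSplitDot s.toList).map String.ofList := by
  simp [PySem.Str.split?, PySem.Chars.split?, ip_splitOn_eq]

-- the pad-loop appends -1s up to length 4 (identity on length ≥ 4)
theorem ipPadA_eq_aux (n : Nat) (l : List Int) (h : 4 - l.length ≤ n) :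
    ipPadA l = l ++ List.replicate (4 - l.length) (-1) := by
  induction n generalizing l with
  | zero =>
      rw [ipPadA, if_neg (by omega), show 4 - l.length = 0 by omega]
      simp
  | succ n ih =>
      by_cases h4 : l.length < 4
      · rw [ipPadA, if_pos h4, ih (l ++ [-1]) (by simp; omega)]
        rw [List.append_assoc]
        congr 1
        rw [List.length_append, List.length_singleton,
          show 4 - l.length = (4 - (l.length + 1)) + 1 by omega]
        simp [List.replicate_succ]
      · rw [ipPadA, if_neg h4, show 4 - l.length = 0 by omega]
        simp

theorem ipPadA_eq (l : List Int) :
    ipPadA l = l ++ List.replicate (4 - l.length) (-1) :=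
  ipPadA_eq_aux 4 l (by omega)

-- both ports compute the same 4-element list before tupling
theorem ip_lists_eq (s : String) :
    (ipPadA (((PySem.Str.split? s ".").getD []).foldl
        (fun acc part => acc ++ [ipOctA part]) [])).take 4 = ipGoB s 4 := by
  rw [PySem.List.foldl_append_singleton_eq_map, List.nil_append, ip_splitA_eq,
    ipPadA_eq, ipGoB_eq 4 (by norm_num), List.map_map,
    List.take_append, List.take_replicate]
  have hoct : (ipOctA ∘ String.ofList) = fun p => ipOctB (String.ofList p) := by
    funext p
    simp only [Function.comp_apply, ipOctA, ipOctB, Option.getD]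
    cases PySem.Int.ofStr? (String.ofList p) <;> rfl
  rw [hoct]
  congr 1
  simp

-- ipGoB always yields exactly four entries
theorem ipGoB_len (s : String) : (ipGoB s 4).length = 4 := by
  rw [ipGoB_eq 4 (by norm_num)]
  simp
  omega

-- ===== VERDICT (by name: the statement is the Claim_ definition above) =====
theorem ip_sort_key_py_spec : Claim_equal_ip_sort_key_py := by
  intro value _
  show ip_sort_key_py value = ip_sort_key_py_alt value
  simp only [ip_sort_key_py, ip_sort_key_py_alt]
  rw [PySem.List.slice_to _ (by norm_num), show ((4:Int)).toNat = 4 from rfl,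
    ip_lists_eq]
  have h := ipGoB_len value
  generalize hL : ipGoB value 4 = L at h ⊢
  rcases L with _ | ⟨a, _ | ⟨b, _ | ⟨c, _ | ⟨d, _ | ⟨e, t⟩⟩⟩⟩⟩
  all_goals first | rfl | simp at h
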